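-- pv_equiv track=rewrite | github.com/queelius/computational-explorations | src/coprime_perfectness_proof.py | coprime_graph_adj
-- ===== SOURCE A (Python) =====
-- import math
-- from typing import List, Set, Dict, Tuple, Optional
--
-- def coprime_graph_adj(n: int) -> Dict[int, Set[int]]:
--     """Build adjacency-set representation of the coprime graph G(n).
--
--     Vertices: 1, ..., n.  Edge {a, b} iff gcd(a, b) = 1.
--     """
--     adj: Dict[int, Set[int]] = {v: set() for v in range(1, n + 1)}
--     for a in range(1, n + 1):
--         for b in range(a + 1, n + 1):
--             if math.gcd(a, b) == 1:
--                 adj[a].add(b)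
--                 adj[b].add(a)
--     return adj
-- ===== SOURCE B (Python) =====
-- def coprime_graph_adj(n):
--     """For each vertex v, mark v and the multiples of every divisor d >= 2 of v
--     as non-neighbours, then take the unmarked vertices; no gcd calls."""
--     adj = {}
--     for v in range(1, n + 1):
--         bad = {v}
--         for d in range(2, v + 1):
--             if v % d == 0:
--                 for m in range(d, n + 1, d):
--                     bad.add(m)
--         adj[v] = {u for u in range(1, n + 1) if u not in bad}
--     return adj
-- ===== Notes on version B (the rewrite author's own statement) =====
-- stated objective: alternative
-- what changed: Instead of testing gcd(a,b)==1 for every unordered pair and mutating both endpoints' sets, B builds each vertex's row independently: it marks v and the multiples of every divisor >= 2 of v as non-neighbours and keeps the unmarked vertices; no gcd calls.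
import Mathlib
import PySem

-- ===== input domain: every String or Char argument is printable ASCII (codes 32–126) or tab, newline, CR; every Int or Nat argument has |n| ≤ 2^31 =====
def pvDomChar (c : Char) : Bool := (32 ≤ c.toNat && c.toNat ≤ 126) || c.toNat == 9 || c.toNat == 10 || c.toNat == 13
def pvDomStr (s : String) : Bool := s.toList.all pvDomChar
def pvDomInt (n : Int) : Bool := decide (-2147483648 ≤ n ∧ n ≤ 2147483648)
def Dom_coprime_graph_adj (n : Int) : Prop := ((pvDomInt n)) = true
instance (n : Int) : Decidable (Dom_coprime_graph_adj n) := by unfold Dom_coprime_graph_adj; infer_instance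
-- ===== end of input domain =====

-- B builds each vertex's adjacency row independently: it marks v and the multiples of
-- every divisor ≥ 2 of v as non-neighbours and keeps the unmarked vertices (no gcd
-- calls): an alternative algorithm of comparable cost.

-- ===== PORT A =====
def coprime_graph_adj (n : Int) : List (Int × List Int) :=
  let adj : PySem.Dict Int (PySem.Set Int) :=
    PySem.Dict.ofList ((PySem.List.pyRange 1 (n+1) 1).map (fun v => (v, ([] : PySem.Set Int))))
  let adj := (PySem.List.pyRange 1 (n+1) 1).foldl (fun adj a =>
    (PySem.List.pyRange (a+1) (n+1) 1).foldl (fun adj b =>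
      if Int.gcd a b = 1 then
        (adj.modify a [] (fun s => PySem.Set.add s b)).modify b [] (fun s => PySem.Set.add s a)
      else adj) adj) adj
  adj.items

-- ===== PORT B =====
def coprime_graph_adj_alt (n : Int) : List (Int × List Int) :=
  ((PySem.List.pyRange 1 (n+1) 1).foldl (fun adj v =>
    let bad : PySem.Set Int := PySem.Set.ofList [v]
    let bad := (PySem.List.pyRange 2 (v+1) 1).foldl (fun bad d =>
      if PySem.Int.mod v d = 0 then
        (PySem.List.pyRange d (n+1) d).foldl (fun bad m => PySem.Set.add bad m) bad
      else bad) bad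
    adj.insert v (PySem.Set.ofList ((PySem.List.pyRange 1 (n+1) 1).filter
      (fun u => !(PySem.Set.contains bad u))))) (PySem.Dict.empty : PySem.Dict Int (PySem.Set Int))).items

-- ===== PRECONDITION & SPEC =====
def Spec_coprime_graph_adj (n : Int) (out : List (Int × List Int)) : Prop := out = coprime_graph_adj_alt n
instance (n : Int) (out : List (Int × List Int)) : Decidable (Spec_coprime_graph_adj n out) := by unfold Spec_coprime_graph_adj; infer_instance

-- ===== CLAIM (what is proved, stated in full; the proofs are below) =====
def Claim_equal_coprime_graph_adj : Prop := ∀ (n : Int), Dom_coprime_graph_adj n → Spec_coprime_graph_adj n (coprime_graph_adj n)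

-- ===== LEMMAS AND PROOFS =====

-- the vertex list 1..n, the coprime-row predicate, and the common specification
def pvRng (n : Int) : List Int := PySem.List.pyRange 1 (n+1) 1
def pvCo (v u : Int) : Bool := decide (u ≠ v ∧ Int.gcd v u = 1)
def pvRow (n v : Int) : List Int := (pvRng n).filter (pvCo v)
def pvSpec (n : Int) : List (Int × List Int) := (pvRng n).map (fun v => (v, pvRow n v))
-- A's in-progress row predicate: the pairs (x, y), x < y, processed so far are exactly
-- those with x < a, or x = a and y < b
def pvPA (a b v u : Int) : Bool :=
  decide (u ≠ v ∧ Int.gcd (min u v) (max u v) = 1 ∧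
    (min u v < a ∨ (min u v = a ∧ max u v < b)))
-- B's non-neighbour marks for vertex v
def pvBad (n v : Int) : PySem.Set Int :=
  (PySem.List.pyRange 2 (v+1) 1).foldl (fun bad d =>
    if PySem.Int.mod v d = 0 then
      (PySem.List.pyRange d (n+1) d).foldl (fun bad m => PySem.Set.add bad m) bad
    else bad) (PySem.Set.ofList [v])
-- A's loop bodies, named (defeq to the lambdas in the port)
def pvInner (a : Int) : PySem.Dict Int (PySem.Set Int) → Int → PySem.Dict Int (PySem.Set Int) :=
  fun adj b => if Int.gcd a b = 1 then
    (adj.modify a [] (fun s => PySem.Set.add s b)).modify b [] (fun s => PySem.Set.add s a)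
  else adj
def pvOuter (n : Int) : PySem.Dict Int (PySem.Set Int) → Int → PySem.Dict Int (PySem.Set Int) :=
  fun adj a => (PySem.List.pyRange (a+1) (n+1) 1).foldl (pvInner a) adj
-- B's row computation, named (defeq to the let-chain in the port)
def pvRowB (n v : Int) : List Int :=
  PySem.Set.ofList ((PySem.List.pyRange 1 (n+1) 1).filter
    (fun u => !(PySem.Set.contains (pvBad n v) u)))

theorem pvMemRng (n v : Int) : v ∈ pvRng n ↔ 1 ≤ v ∧ v < n + 1 := by
  rw [pvRng]; exact PySem.List.mem_pyRange_one

theorem pvFoldAddMem (v n : Int) : ∀ (D : List Int) (s : PySem.Set Int) (x : Int),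
    (x ∈ D.foldl (fun bad d => if PySem.Int.mod v d = 0 then
        (PySem.List.pyRange d (n+1) d).foldl (fun bad m => PySem.Set.add bad m) bad
      else bad) s) ↔
      x ∈ s ∨ ∃ d ∈ D, PySem.Int.mod v d = 0 ∧ x ∈ PySem.List.pyRange d (n+1) d := by
  intro D
  induction D with
  | nil => simp
  | cons d D ih =>
    intro s x
    rw [List.foldl_cons, ih]
    have hstep : (x ∈ (if PySem.Int.mod v d = 0 then
        (PySem.List.pyRange d (n+1) d).foldl (fun bad m => PySem.Set.add bad m) s else s))
        ↔ x ∈ s ∨ (PySem.Int.mod v d = 0 ∧ x ∈ PySem.List.pyRange d (n+1) d) := by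
      by_cases hm : PySem.Int.mod v d = 0
      · rw [if_pos hm]
        rw [show (PySem.List.pyRange d (n+1) d).foldl (fun bad m => PySem.Set.add bad m) s
            = PySem.Set.update s (PySem.List.pyRange d (n+1) d) from rfl]
        rw [PySem.Set.mem_update]
        tauto
      · rw [if_neg hm]; tauto
    rw [hstep]
    simp only [List.mem_cons]
    constructor
    · rintro ((hx | ⟨hm, hx⟩) | ⟨d', hd', hm', hx'⟩)
      · exact Or.inl hx
      · exact Or.inr ⟨d, Or.inl rfl, hm, hx⟩
      · exact Or.inr ⟨d', Or.inr hd', hm', hx'⟩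
    · rintro (hx | ⟨d', hd'', hm', hx'⟩)
      · exact Or.inl (Or.inl hx)
      · rcases hd'' with h | h
        · subst h; exact Or.inl (Or.inr ⟨hm', hx'⟩)
        · exact Or.inr ⟨d', h, hm', hx'⟩

-- the unmarked vertices are exactly the coprime partners
theorem pvBadNotMem (n v u : Int) (hu : u ∈ pvRng n) (hv : v ∈ pvRng n) :
    (!(PySem.Set.contains (pvBad n v) u)) = pvCo v u := by
  rw [pvMemRng] at hu hv
  unfold pvCo
  rw [Bool.eq_iff_iff]
  simp only [Bool.not_eq_true', decide_eq_true_eq]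
  have hcon : PySem.Set.contains (pvBad n v) u = false ↔ ¬ (u ∈ pvBad n v) := by
    constructor
    · intro h hmem
      rw [(PySem.Set.contains_iff (pvBad n v) u).mpr hmem] at h
      cases h
    · intro h
      cases hc : PySem.Set.contains (pvBad n v) u
      · rfl
      · exact absurd ((PySem.Set.contains_iff (pvBad n v) u).mp hc) h
  rw [hcon]
  have hbad : u ∈ pvBad n v ↔ u = v ∨ ∃ d ∈ PySem.List.pyRange 2 (v+1) 1,
      PySem.Int.mod v d = 0 ∧ u ∈ PySem.List.pyRange d (n+1) d := by
    unfold pvBad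
    rw [pvFoldAddMem]
    rw [show (PySem.Set.ofList [v] : List Int) = [v] from rfl]
    simp only [List.mem_singleton]
  rw [hbad]
  have hmem : ∀ d : Int, 2 ≤ d → ((u ∈ PySem.List.pyRange d (n+1) d) ↔ (d ∣ u)) := by
    intro d hd
    rw [PySem.List.mem_pyRange_iff_of_pos (by omega)]
    constructor
    · rintro ⟨h1, h2, h3⟩
      have h4 := Int.dvd_add h3 (dvd_refl d)
      simpa using h4
    · intro h
      refine ⟨Int.le_of_dvd (by omega) h, by omega, ?_⟩
      exact Int.dvd_sub h ⟨1, by ring⟩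
  constructor
  · intro hno
    push Not at hno
    obtain ⟨h1, h2⟩ := hno
    refine ⟨h1, ?_⟩
    by_contra hg
    have hgpos : v.gcd u ≠ 0 := by
      intro h0
      rw [Int.gcd_eq_zero_iff] at h0
      omega
    have hg2 : 2 ≤ (v.gcd u : Int) := by omega
    have hdv : (v.gcd u : Int) ∣ v := Int.gcd_dvd_left v u
    have hdu : (v.gcd u : Int) ∣ u := Int.gcd_dvd_right v u
    have hdle : (v.gcd u : Int) ≤ v := Int.le_of_dvd (by omega) hdv
    exact h2 (v.gcd u : Int) (by rw [PySem.List.mem_pyRange_one]; omega)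
      (Int.fmod_eq_zero_of_dvd hdv) ((hmem _ hg2).mpr hdu)
  · rintro ⟨h1, h2⟩
    rintro (hx | ⟨d, hd, hmod, hin⟩)
    · exact h1 hx
    · rw [PySem.List.mem_pyRange_one] at hd
      have hdv : d ∣ v := Int.dvd_of_fmod_eq_zero hmod
      have hdu : d ∣ u := (hmem d (by omega)).mp hin
      have hdg : d ∣ (Int.gcd v u : Int) := Int.dvd_coe_gcd hdv hdu
      rw [h2] at hdg
      have := Int.le_of_dvd (by omega) hdg
      omega

theorem pvAddAppend (s : List Int) (x : Int) (h : x ∉ s) : PySem.Set.add s x = s ++ [x] := by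
  unfold PySem.Set.add
  rw [if_neg]
  intro hc
  exact h ((PySem.Set.contains_iff s x).mp hc)

-- A1: processing pair (a,b): row of a gains b at the end
theorem pvA1 (n a b : Int) (ha : 1 ≤ a) (hab : a < b) (hb : b ≤ n) (hg : Int.gcd a b = 1) :
    (pvRng n).filter (pvPA a b a) ++ [b] = (pvRng n).filter (pvPA a (b+1) a) := by
  have hsplit : pvRng n = PySem.List.pyRange 1 b ++ (b :: PySem.List.pyRange (b+1) (n+1)) := by
    have h1 : PySem.List.pyRange b (n+1) = b :: PySem.List.pyRange (b+1) (n+1) :=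
      PySem.List.pyRange_one_cons (by omega)
    rw [pvRng, PySem.List.pyRange_one_append 1 b (n+1) (by omega) (by omega), h1]
  have hfront : (PySem.List.pyRange 1 b).filter (pvPA a b a)
      = (PySem.List.pyRange 1 b).filter (pvPA a (b+1) a) := by
    apply List.filter_congr
    intro u hu
    rw [PySem.List.mem_pyRange_one] at hu
    unfold pvPA
    rw [decide_eq_decide]
    constructor <;> rintro ⟨h1, h2, h3⟩ <;> exact ⟨h1, h2, by omega⟩
  have htail : ∀ u ∈ PySem.List.pyRange (b+1) (n+1), ∀ b' : Int, b' ≤ b + 1 → pvPA a b' a u = false := by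
    intro u hu b' hb'
    rw [PySem.List.mem_pyRange_one] at hu
    unfold pvPA
    simp only [decide_eq_false_iff_not]
    rintro ⟨h1, h2, h3⟩
    omega
  have hmid1 : pvPA a b a b = false := by
    unfold pvPA
    simp only [decide_eq_false_iff_not]
    rintro ⟨h1, h2, h3⟩
    omega
  have hmid2 : pvPA a (b+1) a b = true := by
    unfold pvPA
    rw [decide_eq_true_eq]
    have hmin : min b a = a := by omega
    have hmax : max b a = b := by omega
    exact ⟨by omega, by rw [hmin, hmax]; exact hg, by omega⟩
  have ht1 : (PySem.List.pyRange (b+1) (n+1)).filter (pvPA a b a) = [] :=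
    List.filter_eq_nil_iff.mpr (fun u hu => by simp [htail u hu b (by omega)])
  have ht2 : (PySem.List.pyRange (b+1) (n+1)).filter (pvPA a (b+1) a) = [] :=
    List.filter_eq_nil_iff.mpr (fun u hu => by simp [htail u hu (b+1) (by omega)])
  rw [hsplit, List.filter_append, List.filter_append, List.filter_cons, List.filter_cons,
    hmid1, hmid2, hfront, ht1, ht2]
  simp

-- A2: processing pair (a,b): row of b gains a at the end
theorem pvA2 (n a b : Int) (ha : 1 ≤ a) (hab : a < b) (hb : b ≤ n) (hg : Int.gcd a b = 1) :
    (pvRng n).filter (pvPA a b b) ++ [a] = (pvRng n).filter (pvPA a (b+1) b) := by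
  have hsplit : pvRng n = PySem.List.pyRange 1 a ++ (a :: PySem.List.pyRange (a+1) (n+1)) := by
    have h1 : PySem.List.pyRange a (n+1) = a :: PySem.List.pyRange (a+1) (n+1) :=
      PySem.List.pyRange_one_cons (by omega)
    rw [pvRng, PySem.List.pyRange_one_append 1 a (n+1) (by omega) (by omega), h1]
  have hfront : (PySem.List.pyRange 1 a).filter (pvPA a b b)
      = (PySem.List.pyRange 1 a).filter (pvPA a (b+1) b) := by
    apply List.filter_congr
    intro u hu
    rw [PySem.List.mem_pyRange_one] at hu
    unfold pvPA
    rw [decide_eq_decide]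
    constructor <;> rintro ⟨h1, h2, h3⟩ <;> exact ⟨h1, h2, by omega⟩
  have htail : ∀ u ∈ PySem.List.pyRange (a+1) (n+1), ∀ b' : Int, b' ≤ b + 1 → pvPA a b' b u = false := by
    intro u hu b' hb'
    rw [PySem.List.mem_pyRange_one] at hu
    unfold pvPA
    simp only [decide_eq_false_iff_not]
    rintro ⟨h1, h2, h3⟩
    omega
  have hmid1 : pvPA a b b a = false := by
    unfold pvPA
    simp only [decide_eq_false_iff_not]
    rintro ⟨h1, h2, h3⟩
    omega
  have hmid2 : pvPA a (b+1) b a = true := by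
    unfold pvPA
    rw [decide_eq_true_eq]
    have hmin : min a b = a := by omega
    have hmax : max a b = b := by omega
    exact ⟨by omega, by rw [hmin, hmax]; exact hg, by omega⟩
  have ht1 : (PySem.List.pyRange (a+1) (n+1)).filter (pvPA a b b) = [] :=
    List.filter_eq_nil_iff.mpr (fun u hu => by simp [htail u hu b (by omega)])
  have ht2 : (PySem.List.pyRange (a+1) (n+1)).filter (pvPA a (b+1) b) = [] :=
    List.filter_eq_nil_iff.mpr (fun u hu => by simp [htail u hu (b+1) (by omega)])
  rw [hsplit, List.filter_append, List.filter_append, List.filter_cons, List.filter_cons,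
    hmid1, hmid2, hfront, ht1, ht2]
  simp

-- rows of vertices other than a and b (or any row when gcd(a,b) ≠ 1) are unchanged
theorem pvStepCongr (n a b v : Int) (hcase : Int.gcd a b = 1 → v ≠ a ∧ v ≠ b) :
    (pvRng n).filter (pvPA a b v) = (pvRng n).filter (pvPA a (b+1) v) := by
  apply List.filter_congr
  intro u hu
  unfold pvPA
  rw [decide_eq_decide]
  by_cases hg : Int.gcd a b = 1
  · obtain ⟨hva, hvb⟩ := hcase hg
    constructor <;> rintro ⟨h1, h2, h3⟩ <;> exact ⟨h1, h2, by omega⟩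
  · constructor <;> rintro ⟨h1, h2, h3⟩ <;> refine ⟨h1, h2, ?_⟩ <;>
    · by_cases hm : min u v = a ∧ max u v = b
      · rw [hm.1, hm.2] at h2; exact absurd h2 hg
      · omega

-- end of inner loop at b = n+1 restated as start of outer iteration a+1
theorem pvA5 (n a v : Int) (hv : v ∈ pvRng n) :
    (pvRng n).filter (pvPA a (n+1) v) = (pvRng n).filter (pvPA (a+1) (a+2) v) := by
  rw [pvMemRng] at hv
  apply List.filter_congr
  intro u hu
  rw [pvMemRng] at hu
  unfold pvPA
  rw [decide_eq_decide]
  constructor <;> rintro ⟨h1, h2, h3⟩ <;> exact ⟨h1, h2, by omega⟩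

-- the finished predicate is the coprime row
theorem pvA6 (n v : Int) (hv : v ∈ pvRng n) :
    (pvRng n).filter (pvPA (n+1) (n+2) v) = pvRow n v := by
  rw [pvMemRng] at hv
  unfold pvRow
  apply List.filter_congr
  intro u hu
  rw [pvMemRng] at hu
  unfold pvPA pvCo
  rw [decide_eq_decide]
  have hgc : Int.gcd (min u v) (max u v) = Int.gcd v u := by
    rcases le_total u v with h | h
    · rw [min_eq_left h, max_eq_right h, Int.gcd_comm]
    · rw [min_eq_right h, max_eq_left h]
  rw [hgc]
  constructor
  · rintro ⟨h1, h2, h3⟩; exact ⟨h1, h2⟩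
  · rintro ⟨h1, h2⟩; exact ⟨h1, h2, by omega⟩

theorem pvInnerStep (n a b : Int) (ha : 1 ≤ a) (hab : a < b) (hb : b ≤ n)
    (d : PySem.Dict Int (PySem.Set Int)) (hk : d.keys = pvRng n)
    (hg : ∀ v ∈ pvRng n, d.getD v [] = (pvRng n).filter (pvPA a b v)) :
    (pvInner a d b).keys = pvRng n ∧
      (∀ v ∈ pvRng n, (pvInner a d b).getD v [] = (pvRng n).filter (pvPA a (b+1) v)) := by
  have haR : a ∈ pvRng n := by rw [pvMemRng]; omega
  have hbR : b ∈ pvRng n := by rw [pvMemRng]; omega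
  unfold pvInner
  by_cases hgcd : Int.gcd a b = 1
  · rw [if_pos hgcd]
    have hca : d.contains a = true := (PySem.Dict.contains_iff_mem_keys d a).mpr (by rw [hk]; exact haR)
    have hk1 : (d.modify a [] (fun s => PySem.Set.add s b)).keys = d.keys := by
      rw [PySem.Dict.keys_modify]
      exact PySem.Dict.keys_insert_of_contains d _ hca
    have hcb : (d.modify a [] (fun s => PySem.Set.add s b)).contains b = true := by
      rw [PySem.Dict.contains_iff_mem_keys, hk1, hk]; exact hbR
    have hk2 : ((d.modify a [] (fun s => PySem.Set.add s b)).modify b []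
        (fun s => PySem.Set.add s a)).keys = d.keys := by
      rw [PySem.Dict.keys_modify, PySem.Dict.keys_insert_of_contains _ _ hcb]
      exact hk1
    refine ⟨by rw [hk2, hk], ?_⟩
    intro v hv
    simp only [PySem.Dict.getD_modify]
    by_cases hvb : v = b
    · subst hvb
      rw [if_pos rfl, if_neg (by omega : ¬ v = a), hg v hv]
      have hnotmem : a ∉ (pvRng n).filter (pvPA a v v) := by
        intro hmem
        have h2 := List.of_mem_filter hmem
        unfold pvPA at h2
        rw [decide_eq_true_eq] at h2
        obtain ⟨h3, h4, h5⟩ := h2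
        omega
      rw [pvAddAppend _ _ hnotmem]
      exact pvA2 n a v ha hab hb hgcd
    · rw [if_neg hvb]
      by_cases hva : v = a
      · subst hva
        rw [if_pos rfl, hg v hv]
        have hnotmem : b ∉ (pvRng n).filter (pvPA v b v) := by
          intro hmem
          have h2 := List.of_mem_filter hmem
          unfold pvPA at h2
          rw [decide_eq_true_eq] at h2
          obtain ⟨h3, h4, h5⟩ := h2
          omega
        rw [pvAddAppend _ _ hnotmem]
        exact pvA1 n v b ha hab hb hgcd
      · rw [if_neg hva, hg v hv]
        exact pvStepCongr n a b v (fun _ => ⟨hva, hvb⟩)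
  · rw [if_neg hgcd]
    refine ⟨hk, ?_⟩
    intro v hv
    rw [hg v hv]
    exact pvStepCongr n a b v (fun h => absurd h hgcd)

theorem pvInnerLoop (n a : Int) (ha : 1 ≤ a) : ∀ (k : Nat) (b : Int), a < b → b ≤ n+1 →
    ((n+1) - b).toNat = k →
    ∀ d : PySem.Dict Int (PySem.Set Int), d.keys = pvRng n →
      (∀ v ∈ pvRng n, d.getD v [] = (pvRng n).filter (pvPA a b v)) →
      ((PySem.List.pyRange b (n+1) 1).foldl (pvInner a) d).keys = pvRng n ∧
      (∀ v ∈ pvRng n, ((PySem.List.pyRange b (n+1) 1).foldl (pvInner a) d).getD v []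
        = (pvRng n).filter (pvPA a (n+1) v)) := by
  intro k
  induction k with
  | zero =>
    intro b h1 h2 h3 d hk hg
    have hb : b = n + 1 := by omega
    subst hb
    rw [PySem.List.pyRange_one_eq_nil (le_refl _), List.foldl_nil]
    exact ⟨hk, hg⟩
  | succ k ih =>
    intro b h1 h2 h3 d hk hg
    rw [PySem.List.pyRange_one_cons (by omega : b < n + 1), List.foldl_cons]
    obtain ⟨hk', hg'⟩ := pvInnerStep n a b ha h1 (by omega) d hk hg
    exact ih (b+1) (by omega) (by omega) (by omega) _ hk' hg'

theorem pvOuterLoop (n : Int) : ∀ (k : Nat) (a : Int), 1 ≤ a → a ≤ n+1 →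
    ((n+1) - a).toNat = k →
    ∀ d : PySem.Dict Int (PySem.Set Int), d.keys = pvRng n →
      (∀ v ∈ pvRng n, d.getD v [] = (pvRng n).filter (pvPA a (a+1) v)) →
      ((PySem.List.pyRange a (n+1) 1).foldl (pvOuter n) d).keys = pvRng n ∧
      (∀ v ∈ pvRng n, ((PySem.List.pyRange a (n+1) 1).foldl (pvOuter n) d).getD v []
        = (pvRng n).filter (pvPA (n+1) (n+2) v)) := by
  intro k
  induction k with
  | zero =>
    intro a h1 h2 h3 d hk hg
    have hb : a = n + 1 := by omega
    subst hb
    rw [PySem.List.pyRange_one_eq_nil (le_refl _), List.foldl_nil]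
    refine ⟨hk, fun v hv => ?_⟩
    rw [hg v hv]
    have he : (n : Int) + 1 + 1 = n + 2 := by ring
    rw [he]
  | succ k ih =>
    intro a h1 h2 h3 d hk hg
    rw [PySem.List.pyRange_one_cons (by omega : a < n + 1), List.foldl_cons]
    obtain ⟨hk', hg'⟩ := pvInnerLoop n a h1 ((n+1)-(a+1)).toNat (a+1) (by omega) (by omega) rfl d hk hg
    apply ih (a+1) (by omega) (by omega) (by omega) _ hk'
    intro v hv
    calc (pvOuter n d a).getD v [] = (pvRng n).filter (pvPA a (n+1) v) := hg' v hv
      _ = (pvRng n).filter (pvPA (a+1) (a+2) v) := pvA5 n a v hv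
      _ = (pvRng n).filter (pvPA (a+1) (a+1+1) v) := by
            rw [show (a : Int) + 1 + 1 = a + 2 from by ring]

-- the initial dict {v: set() for v in 1..n}
theorem pvInit (n : Int) :
    (PySem.Dict.ofList ((pvRng n).map (fun v => (v, ([] : PySem.Set Int))))).items
      = (pvRng n).map (fun v => (v, ([] : List Int))) := by
  have hm : List.map Prod.fst ((pvRng n).map (fun v => (v, ([] : PySem.Set Int)))) = pvRng n := by
    simp [Function.comp_def]
  have hfresh := PySem.Dict.items_foldl_insert_fresh
    ((pvRng n).map (fun v => (v, ([] : PySem.Set Int)))) Prod.fst Prod.snd PySem.Dict.empty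
    (fun p _ => PySem.Dict.contains_empty p.1)
    (by rw [hm]; exact PySem.List.nodup_pyRange_one 1 (n+1))
  refine Eq.trans hfresh ?_
  rw [show (PySem.Dict.empty : PySem.Dict Int (PySem.Set Int)).items = [] from rfl,
    List.nil_append]
  simp [List.map_map, Function.comp_def]

theorem pvThmA (n : Int) : coprime_graph_adj n = pvSpec n := by
  show ((PySem.List.pyRange 1 (n+1) 1).foldl (pvOuter n)
      (PySem.Dict.ofList ((pvRng n).map (fun v => (v, ([] : PySem.Set Int)))))).items = pvSpec n
  have h0 := pvInit n
  have hkeys : (PySem.Dict.ofList ((pvRng n).map (fun v => (v, ([] : PySem.Set Int))))).keys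
      = pvRng n := by
    unfold PySem.Dict.keys
    rw [h0]
    simp [List.map_map, Function.comp_def]
  rcases Int.lt_or_le n 0 with hn | hn
  · have hrng : pvRng n = [] := by rw [pvRng]; exact PySem.List.pyRange_one_eq_nil (by omega)
    have hrng2 : PySem.List.pyRange 1 (n+1) 1 = [] := PySem.List.pyRange_one_eq_nil (by omega)
    rw [hrng2, List.foldl_nil, h0]
    unfold pvSpec
    rw [hrng]
    simp
  · have hgetD : ∀ v ∈ pvRng n,
        (PySem.Dict.ofList ((pvRng n).map (fun v => (v, ([] : PySem.Set Int))))).getD v [] = [] := by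
      intro v hv
      apply PySem.Dict.getD_of_mem_items
      · rw [h0]
        exact List.mem_map.mpr ⟨v, hv, rfl⟩
      · rw [hkeys, pvRng]
        exact PySem.List.nodup_pyRange_one 1 (n+1)
    have hinit : ∀ v ∈ pvRng n,
        (PySem.Dict.ofList ((pvRng n).map (fun v => (v, ([] : PySem.Set Int))))).getD v []
          = (pvRng n).filter (pvPA 1 (1+1) v) := by
      intro v hv
      rw [hgetD v hv]
      symm
      apply List.filter_eq_nil_iff.mpr
      intro u hu
      rw [pvMemRng] at hu
      unfold pvPA
      simp only [decide_eq_true_eq]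
      rw [pvMemRng] at hv
      rintro ⟨h1, h2, h3⟩
      omega
    obtain ⟨hk', hg'⟩ := pvOuterLoop n ((n+1)-1).toNat 1 (by omega) (by omega) (by omega) _ hkeys hinit
    rw [PySem.Dict.items_eq_map_keys _
      (by rw [hk', pvRng]; exact PySem.List.nodup_pyRange_one 1 (n+1)) ([] : PySem.Set Int), hk']
    unfold pvSpec
    apply List.map_congr_left
    intro v hv
    rw [hg' v hv, pvA6 n v hv]

theorem pvRowB_eq (n v : Int) (hv : v ∈ pvRng n) : pvRowB n v = pvRow n v := by
  unfold pvRowB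
  have hnd : ((PySem.List.pyRange 1 (n+1) 1).filter
      (fun u => !(PySem.Set.contains (pvBad n v) u))).Nodup :=
    (PySem.List.nodup_pyRange_one 1 (n+1)).filter _
  rw [PySem.Set.ofList_eq_self_of_nodup _ hnd]
  unfold pvRow
  apply List.filter_congr
  intro u hu
  exact pvBadNotMem n v u hu hv

theorem pvThmB (n : Int) : coprime_graph_adj_alt n = pvSpec n := by
  show ((pvRng n).foldl (fun adj v => adj.insert v (pvRowB n v))
      (PySem.Dict.empty : PySem.Dict Int (PySem.Set Int))).items = pvSpec n
  refine Eq.trans (PySem.Dict.items_foldl_insert_fresh (pvRng n) (fun v => v)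
    (fun v => pvRowB n v) PySem.Dict.empty (fun a _ => PySem.Dict.contains_empty a)
    (by simpa using PySem.List.nodup_pyRange_one 1 (n+1))) ?_
  rw [show (PySem.Dict.empty : PySem.Dict Int (PySem.Set Int)).items = [] from rfl,
    List.nil_append]
  unfold pvSpec
  apply List.map_congr_left
  intro v hv
  show (v, pvRowB n v) = (v, pvRow n v)
  rw [pvRowB_eq n v hv]

-- ===== VERDICT (by name: the statement is the Claim_ definition above) =====
theorem coprime_graph_adj_spec : Claim_equal_coprime_graph_adj := by
  intro n _
  unfold Spec_coprime_graph_adj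
  rw [pvThmA, pvThmB]
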